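-- pv_equiv track=rewrite | github.com/YousifWaleedHusseinZaki/Network-Packet-Investigator-master | detectors/phishing.py | _is_typosquat_strict
-- ===== SOURCE A (Python) =====
-- def _is_typosquat_strict(domain, brand):
--     """Strict typosquatting check - requires close match."""
--     # Must be similar length
--     if abs(len(domain) - len(brand)) > 3:
--         return False
--
--     # Check for common typosquatting patterns
--     # 1. Character substitution (e.g., paypai, g00gle)
--     if domain.replace('0', 'o').replace('1', 'l').replace('5', 's') == brand:
--         return True
--
--     # 2. Single character insertion/deletion
--     if len(domain) == len(brand) + 1:
--         for i in range(len(domain)):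
--             if domain[:i] + domain[i+1:] == brand:
--                 return True
--
--     # 3. Single character change (but not substring match)
--     if len(domain) == len(brand):
--         differences = sum(1 for a, b in zip(domain, brand) if a != b)
--         if differences == 1:
--             return True
--
--     # 4. Transposition (e.g., googel)
--     if len(domain) == len(brand):
--         for i in range(len(domain) - 1):
--             swapped = list(domain)
--             swapped[i], swapped[i+1] = swapped[i+1], swapped[i]
--             if ''.join(swapped) == brand:
--                 return True
--
--     return False
-- ===== SOURCE B (Python) =====
-- def _is_typosquat_strict(domain, brand):
--     """One-pass typosquat check: locate the first mismatch and test the single edit there."""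
--     n, m = len(domain), len(brand)
--     if abs(n - m) > 3:
--         return False
--     # 1. digit-for-letter substitution, applied positionally in one pass
--     table = {'0': 'o', '1': 'l', '5': 's'}
--     if n == m and all(table.get(c, c) == b for c, b in zip(domain, brand)):
--         return True
--     # 2. single deletion: only deleting at the first mismatch can work
--     if n == m + 1:
--         j = 0
--         while j < m and domain[j] == brand[j]:
--             j += 1
--         return domain[j + 1:] == brand[j:]
--     if n == m:
--         j = 0
--         while j < n and domain[j] == brand[j]:
--             j += 1
--         if j == n:
--             return False  # identical strings: no edit present
--         # 3. single substitution at the mismatch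
--         if domain[j + 1:] == brand[j + 1:]:
--             return True
--         # 4. adjacent transposition at the mismatch
--         return (j + 1 < n and domain[j] == brand[j + 1]
--                 and domain[j + 1] == brand[j]
--                 and domain[j + 2:] == brand[j + 2:])
--     return False
-- ===== Notes on version B (the rewrite author's own statement) =====
-- stated objective: faster
-- what changed: Instead of trying every deletion position and every adjacent swap (rebuilding and comparing a candidate string per index), B locates the first mismatch once and tests deletion, substitution and transposition directly at that position, applying the digit-substitution table positionally in one pass.
-- intended difference: On identical strings that contain a '0'/'1'/'5' and have two equal adjacent characters (e.g. 'g00gle' vs 'g00gle'), A returns True because swapping two equal adjacent characters counts as a transposition, while B returns False; an identical domain is not a typosquat of its brand, so B's value is the intended one. — e.g. on _is_typosquat_strict("g00gle", "g00gle"): A returns true, B returns false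
import Mathlib
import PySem

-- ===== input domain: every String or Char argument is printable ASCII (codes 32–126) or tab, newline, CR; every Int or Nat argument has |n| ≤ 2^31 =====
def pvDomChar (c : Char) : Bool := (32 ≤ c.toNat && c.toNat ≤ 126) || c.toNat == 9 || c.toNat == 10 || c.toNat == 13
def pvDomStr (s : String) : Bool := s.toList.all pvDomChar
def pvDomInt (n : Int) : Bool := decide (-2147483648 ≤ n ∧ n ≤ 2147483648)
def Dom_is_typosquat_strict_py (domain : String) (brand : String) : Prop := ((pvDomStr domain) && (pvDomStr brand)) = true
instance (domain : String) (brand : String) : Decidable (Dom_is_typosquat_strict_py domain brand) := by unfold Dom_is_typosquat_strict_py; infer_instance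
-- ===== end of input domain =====

-- B replaces A's quadratic candidate loops (every single deletion / every adjacent swap is tried) by a
-- single first-mismatch scan per pattern; on identical strings with a 0/1/5 digit and an equal adjacent
-- pair A returns true (a swap of two equal characters) and B returns false (stated as D_ below).

-- ===== PORT A =====
-- sum(1 for a, b in zip(domain, brand) if a != b)
def pvDiffSum (d b : List Char) : Int :=
  (d.zip b).foldl (fun acc p => if p.1 ≠ p.2 then acc + 1 else acc) 0

def is_typosquat_strict_py (domain : String) (brand : String) : Bool :=
  let d := domain.toList
  let b := brand.toList
  -- if abs(len(domain) - len(brand)) > 3: return False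
  if ((d.length : Int) - (b.length : Int)).natAbs > 3 then false
  -- 1. domain.replace('0','o').replace('1','l').replace('5','s') == brand
  else if PySem.Chars.replace (PySem.Chars.replace (PySem.Chars.replace d ['0'] ['o']) ['1'] ['l']) ['5'] ['s'] == b then true
  -- 2. single deletion: for i in range(len(domain)): domain[:i] + domain[i+1:] == brand
  else if d.length == b.length + 1
      && (PySem.List.pyRange 0 (d.length : Int) 1).any (fun i =>
            (PySem.List.slice d none (some i) ++ PySem.List.slice d (some (i + 1)) none) == b) then true
  -- 3. single character change: differences == 1
  else if d.length == b.length && pvDiffSum d b == 1 then true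
  -- 4. transposition: swapped = list(domain); swapped[i], swapped[i+1] = swapped[i+1], swapped[i]
  else if d.length == b.length
      && (PySem.List.pyRange 0 ((d.length : Int) - 1) 1).any (fun i =>
            (PySem.List.pySetD (PySem.List.pySetD d i (PySem.List.pyGetD d (i + 1) ' ')) (i + 1)
              (PySem.List.pyGetD d i ' ')) == b) then true
  else false

-- ===== PORT B =====
-- table.get(c, c) for table = {'0':'o', '1':'l', '5':'s'}
def pvTrB (c : Char) : Char :=
  if c == '0' then 'o' else if c == '1' then 'l' else if c == '5' then 's' else c

-- the while loop 'j = 0; while j < len and d[j] == b[j]: j += 1' (length of the common prefix)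
def pvPfx : List Char → List Char → Nat
  | x :: xs, y :: ys => if x == y then pvPfx xs ys + 1 else 0
  | _, _ => 0

def is_typosquat_strict_py_alt (domain : String) (brand : String) : Bool :=
  let d := domain.toList
  let b := brand.toList
  let n := d.length
  let m := b.length
  if ((n : Int) - (m : Int)).natAbs > 3 then false
  else if n == m && (d.zip b).all (fun p => pvTrB p.1 == p.2) then true
  else if n == m + 1 then
    let j := pvPfx d b
    d.drop (j + 1) == b.drop j      -- domain[j+1:] == brand[j:]
  else if n == m then
    let j := pvPfx d b
    if j == n then false            -- identical strings: no edit present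
    else if d.drop (j + 1) == b.drop (j + 1) then true
    -- indices j and j+1 are in range here, so getD is exact for Python's d[j], b[j+1], …
    else decide (j + 1 < n) && (d.getD j ' ' == b.getD (j + 1) ' ')
          && (d.getD (j + 1) ' ' == b.getD j ' ') && (d.drop (j + 2) == b.drop (j + 2))
  else false

-- ===== PRECONDITION & SPEC =====
-- On identical strings containing a '0'/'1'/'5' and having two equal adjacent characters, A returns
-- true (a swap of two equal adjacent characters counts as a transposition) while B returns false;
-- an identical domain is not a typosquat of its brand, so B's value is the intended one.
def D_is_typosquat_strict_py (domain : String) (brand : String) : Prop :=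
  domain = brand
  ∧ domain.toList.any (fun c => c == '0' || c == '1' || c == '5') = true
  ∧ (domain.toList.zip domain.toList.tail).any (fun p => p.1 == p.2) = true
instance (domain : String) (brand : String) : Decidable (D_is_typosquat_strict_py domain brand) := by
  unfold D_is_typosquat_strict_py; infer_instance

def Spec_is_typosquat_strict_py (domain : String) (brand : String) (out : Bool) : Prop :=
  ¬ D_is_typosquat_strict_py domain brand → out = is_typosquat_strict_py_alt domain brand
instance (domain : String) (brand : String) (out : Bool) : Decidable (Spec_is_typosquat_strict_py domain brand out) := by
  unfold Spec_is_typosquat_strict_py; infer_instance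

def pvDiffWitness_is_typosquat_strict_py : String × String := ("g00gle", "g00gle")
def pvDiffWitnessOut_is_typosquat_strict_py : Bool × Bool := (true, false)

-- ===== CLAIM (what is proved, stated in full; the proofs are below) =====
def Claim_unchanged_is_typosquat_strict_py : Prop := ∀ (domain : String) (brand : String), Dom_is_typosquat_strict_py domain brand → Spec_is_typosquat_strict_py domain brand (is_typosquat_strict_py domain brand)
def Claim_changed_is_typosquat_strict_py : Prop := Dom_is_typosquat_strict_py (pvDiffWitness_is_typosquat_strict_py.1) (pvDiffWitness_is_typosquat_strict_py.2) ∧ D_is_typosquat_strict_py (pvDiffWitness_is_typosquat_strict_py.1) (pvDiffWitness_is_typosquat_strict_py.2) ∧ is_typosquat_strict_py (pvDiffWitness_is_typosquat_strict_py.1) (pvDiffWitness_is_typosquat_strict_py.2) = pvDiffWitnessOut_is_typosquat_strict_py.1 ∧ is_typosquat_strict_py_alt (pvDiffWitness_is_typosquat_strict_py.1) (pvDiffWitness_is_typosquat_strict_py.2) = pvDiffWitnessOut_is_typosquat_strict_py.2 ∧ pvDiffWitnessOut_is_typosquat_strict_py.1 ≠ pvDiffWitnessOut_is_typosquat_stri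ct_py.2
def Claim_exact_is_typosquat_strict_py : Prop := ∀ (domain : String) (brand : String), Dom_is_typosquat_strict_py domain brand → D_is_typosquat_strict_py domain brand → is_typosquat_strict_py domain brand ≠ is_typosquat_strict_py_alt domain brand

-- ===== LEMMAS AND PROOFS =====

theorem replace_go_single (o nn : Char) (l acc : List Char) (fuel : Nat) (h : l.length ≤ fuel) :
    PySem.Chars.replace.go [o] [nn] fuel l acc
      = acc.reverse ++ l.map (fun c => if c = o then nn else c) := by
  induction l generalizing fuel acc with
  | nil =>
    cases fuel <;> simp [PySem.Chars.replace.go]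
  | cons c t ih =>
    cases fuel with
    | zero => simp at h
    | succ f =>
      simp only [PySem.Chars.replace.go]
      by_cases hc : o = c
      · subst hc
        simp [List.isPrefixOf, ih (nn :: acc) f (by simpa using h)]
      · simp [List.isPrefixOf, hc, ih (c :: acc) f (by simpa using h), Ne.symm hc]

theorem replace_single (o nn : Char) (l : List Char) :
    PySem.Chars.replace l [o] [nn] = l.map (fun c => if c = o then nn else c) := by
  rw [PySem.Chars.replace]
  simp [replace_go_single o nn l [] l.length le_rfl]

theorem replace_chain_eq_map (d : List Char) :
    PySem.Chars.replace (PySem.Chars.replace (PySem.Chars.replace d ['0'] ['o']) ['1'] ['l']) ['5'] ['s']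
      = d.map pvTrB := by
  rw [replace_single, replace_single, replace_single, List.map_map, List.map_map]
  apply List.map_congr_left
  intro c _
  simp only [Function.comp_apply, pvTrB, beq_iff_eq]
  by_cases h0 : c = '0'
  · subst h0; simp
  · by_cases h1 : c = '1'
    · subst h1; simp
    · by_cases h5 : c = '5'
      · subst h5; simp
      · simp [h0, h1, h5]

theorem map_eq_iff (f : Char → Char) (d b : List Char) :
    d.map f = b ↔ (d.length = b.length ∧ (d.zip b).all (fun p => f p.1 == p.2) = true) := by
  induction d generalizing b with
  | nil => cases b <;> simp
  | cons x xs ih =>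
    cases b with
    | nil => simp
    | cons y ys =>
      simp only [List.map_cons, List.cons.injEq, List.length_cons, List.zip_cons_cons,
        List.all_cons, Bool.and_eq_true, beq_iff_eq, ih ys, Nat.add_right_cancel_iff]
      tauto

theorem pfx_eq_length_iff (d b : List Char) (h : d.length = b.length) :
    pvPfx d b = d.length ↔ d = b := by
  induction d generalizing b with
  | nil => cases b <;> simp_all [pvPfx]
  | cons x xs ih =>
    cases b with
    | nil => simp at h
    | cons y ys =>
      by_cases hxy : x = y
      · subst hxy; simp [pvPfx, ih ys (by simpa using h)]
      · simp [pvPfx, hxy]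

theorem countP_zero_iff (d b : List Char) (h : d.length = b.length) :
    (d.zip b).countP (fun p => decide ¬ p.1 = p.2) = 0 ↔ d = b := by
  induction d generalizing b with
  | nil => cases b <;> simp_all
  | cons x xs ih =>
    cases b with
    | nil => simp at h
    | cons y ys =>
      rw [List.zip_cons_cons, List.countP_cons]
      by_cases hxy : x = y
      · subst hxy
        have := ih ys (by simpa using h)
        simp only [decide_not] at this ⊢
        simp [this]
      · simp [hxy]

theorem diff_one_iff (d b : List Char) (h : d.length = b.length) :
    (d.zip b).countP (fun p => decide ¬ p.1 = p.2) = 1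
      ↔ (pvPfx d b ≠ d.length ∧ d.drop (pvPfx d b + 1) = b.drop (pvPfx d b + 1)) := by
  induction d generalizing b with
  | nil => cases b <;> simp_all [pvPfx]
  | cons x xs ih =>
    cases b with
    | nil => simp at h
    | cons y ys =>
      have hl : xs.length = ys.length := by simpa using h
      rw [List.zip_cons_cons, List.countP_cons]
      by_cases hxy : x = y
      · subst hxy
        have := ih ys hl
        simp only [decide_not] at this ⊢
        simp [pvPfx, this]
      · have hz := countP_zero_iff xs ys hl
        simp only [decide_not] at hz ⊢
        simp [pvPfx, hxy, hz]

theorem del_iff (d b : List Char) (h : d.length = b.length + 1) :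
    (∃ i : Nat, i < d.length ∧ d.take i ++ d.drop (i + 1) = b)
      ↔ d.drop (pvPfx d b + 1) = b.drop (pvPfx d b) := by
  induction b generalizing d with
  | nil =>
    match d, h with
    | [x], _ =>
      simp [pvPfx]
  | cons y ys ih =>
    match d, h with
    | x :: xs, h =>
      have hl : xs.length = ys.length + 1 := by simpa using h
      by_cases hxy : x = y
      · subst hxy
        rw [show pvPfx (x :: xs) (x :: ys) = pvPfx xs ys + 1 by simp [pvPfx]]
        simp only [List.drop_succ_cons]
        rw [← ih xs hl]
        constructor
        · rintro ⟨i, hi, he⟩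
          cases i with
          | zero =>
            simp at he
            exact ⟨0, by omega, by simp [he]⟩
          | succ k =>
            simp only [List.take_succ_cons, List.drop_succ_cons, List.cons_append,
              List.cons.injEq] at he
            exact ⟨k, by simp at hi; omega, he.2⟩
        · rintro ⟨k, hk, he⟩
          exact ⟨k + 1, by simp; omega, by simp [he]⟩
      · rw [show pvPfx (x :: xs) (y :: ys) = 0 by simp [pvPfx, hxy]]
        simp only [List.drop_succ_cons, List.drop_zero]
        constructor
        · rintro ⟨i, hi, he⟩
          cases i with
          | zero => simpa using he
          | succ k =>
            simp only [List.take_succ_cons, List.drop_succ_cons, List.cons_append,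
              List.cons.injEq] at he
            exact absurd he.1 hxy
        · intro he
          exact ⟨0, by simp, by simpa using he⟩

def pvSwap (d : List Char) (i : Nat) : List Char :=
  (d.set i (d.getD (i + 1) ' ')).set (i + 1) (d.getD i ' ')

theorem swap_zero (x x2 : Char) (t : List Char) :
    pvSwap (x :: x2 :: t) 0 = x2 :: x :: t := by
  simp [pvSwap]

theorem swap_succ (x : Char) (xs : List Char) (k : Nat) :
    pvSwap (x :: xs) (k + 1) = x :: pvSwap xs k := by
  simp [pvSwap]

theorem adj_iff (d : List Char) :
    (∃ i : Nat, i + 1 < d.length ∧ pvSwap d i = d)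
      ↔ (d.zip d.tail).any (fun p => p.1 == p.2) = true := by
  induction d with
  | nil => simp
  | cons x xs ih =>
    cases xs with
    | nil => simp
    | cons x2 t =>
      simp only [List.tail_cons] at ih ⊢
      rw [List.zip_cons_cons, List.any_cons]
      simp only [Bool.or_eq_true]
      rw [← ih]
      constructor
      · rintro ⟨i, hi, he⟩
        cases i with
        | zero =>
          rw [swap_zero] at he
          simp only [List.cons.injEq] at he
          simp [he.1]
        | succ k =>
          rw [swap_succ] at he
          simp only [List.cons.injEq] at he
          right
          exact ⟨k, by simpa using hi, he.2⟩
      · intro hcase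
        rcases hcase with h1 | ⟨k, hk, he⟩
        · refine ⟨0, by simp, ?_⟩
          rw [swap_zero]
          have : x = x2 := by simpa using h1
          rw [this]
        · exact ⟨k + 1, by simpa using Nat.succ_lt_succ hk, by rw [swap_succ, he]⟩

theorem trans_iff (d b : List Char) (h : d.length = b.length) :
    (∃ i : Nat, i + 1 < d.length ∧ pvSwap d i = b)
      ↔ (if pvPfx d b = d.length then (d.zip d.tail).any (fun p => p.1 == p.2) = true
         else (pvPfx d b + 1 < d.length ∧ d.getD (pvPfx d b) ' ' = b.getD (pvPfx d b + 1) ' '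
               ∧ d.getD (pvPfx d b + 1) ' ' = b.getD (pvPfx d b) ' '
               ∧ d.drop (pvPfx d b + 2) = b.drop (pvPfx d b + 2))) := by
  induction d generalizing b with
  | nil =>
    match b, h with
    | [], _ => simp [pvPfx]
  | cons x xs ih =>
    match b, h with
    | y :: ys, h =>
      have hl : xs.length = ys.length := by simpa using h
      by_cases hxy : x = y
      · subst hxy
        by_cases hxs : pvPfx xs ys = xs.length
        · have hxe : xs = ys := (pfx_eq_length_iff xs ys hl).mp hxs
          subst hxe
          rw [if_pos (by simp [pvPfx, hxs])]
          exact adj_iff (x :: xs)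
        · have hne : xs ≠ ys := fun he => hxs (by rw [he]; exact (pfx_eq_length_iff ys ys rfl).mpr rfl ▸ by simp [← he, (pfx_eq_length_iff xs ys hl).mpr he])
          rw [if_neg (by simp [pvPfx]; omega)]
          rw [show pvPfx (x :: xs) (x :: ys) = pvPfx xs ys + 1 by simp [pvPfx]]
          have ihx := ih ys hl
          rw [if_neg hxs] at ihx
          simp only [List.getD_cons_succ, List.drop_succ_cons, List.length_cons]
          have hlen : pvPfx xs ys + 1 + 1 < xs.length + 1 ↔ pvPfx xs ys + 1 < xs.length := by omega
          rw [hlen, ← ihx]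
          constructor
          · rintro ⟨i, hi, he⟩
            cases i with
            | zero =>
              match xs, hi with
              | x2 :: t, _ =>
                rw [swap_zero] at he
                simp only [List.cons.injEq] at he
                exact absurd (by rw [he.1, he.2] : x2 :: t = ys) hne
            | succ k =>
              rw [swap_succ] at he
              simp only [List.cons.injEq] at he
              exact ⟨k, by simp at hi; omega, he.2⟩
          · rintro ⟨k, hk, he⟩
            exact ⟨k + 1, by simp; omega, by rw [swap_succ, he]⟩
      · rw [if_neg (by simp [pvPfx, hxy])]
        rw [show pvPfx (x :: xs) (y :: ys) = 0 by simp [pvPfx, hxy]]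
        simp only [List.getD_cons_succ, List.getD_cons_zero, List.drop_succ_cons,
          List.length_cons, List.drop_zero, Nat.zero_add]
        constructor
        · rintro ⟨i, hi, he⟩
          cases i with
          | zero =>
            match xs, hi with
            | x2 :: t, _ =>
              rw [swap_zero] at he
              simp only [List.cons.injEq] at he
              obtain ⟨h1, h2⟩ := he
              subst h1
              refine ⟨by simp, ?_, ?_, ?_⟩ <;> simp [← h2]
          | succ k =>
            rw [swap_succ] at he
            simp only [List.cons.injEq] at he
            exact absurd he.1 hxy
        · rintro ⟨hlen, h1, h2, h3⟩
          match xs, ys, hl, hlen with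
          | x2 :: t, ys0 :: yt, hl, _ =>
            simp only [List.getD_cons_zero, List.drop_succ_cons, List.drop_zero] at h1 h2 h3
            refine ⟨0, by simp, ?_⟩
            rw [swap_zero]
            subst h3
            simp [h1, h2]

theorem bool_eq_of_iff {a b : Bool} (h : a = true ↔ b = true) : a = b := by
  cases a <;> cases b <;> simp_all

theorem del_any_iff (d b : List Char) :
    ((PySem.List.pyRange 0 (d.length : Int) 1).any (fun i =>
        (PySem.List.slice d none (some i) ++ PySem.List.slice d (some (i + 1)) none) == b)) = true
      ↔ (∃ k : Nat, k < d.length ∧ d.take k ++ d.drop (k + 1) = b) := by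
  rw [List.any_eq_true]
  constructor
  · rintro ⟨i, hmem, hp⟩
    rw [PySem.List.mem_pyRange_one] at hmem
    obtain ⟨h0, hn⟩ := hmem
    refine ⟨i.toNat, by omega, ?_⟩
    have hi : i = ((i.toNat : Nat) : Int) := by omega
    rw [hi] at hp
    rw [PySem.List.slice_to_natCast] at hp
    rw [show ((i.toNat : Nat) : Int) + 1 = (((i.toNat + 1 : Nat)) : Int) by push_cast; ring] at hp
    rw [PySem.List.slice_from_natCast] at hp
    simpa using hp
  · rintro ⟨k, hk, he⟩
    refine ⟨(k : Int), PySem.List.mem_pyRange_one.mpr ⟨by omega, by omega⟩, ?_⟩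
    rw [PySem.List.slice_to_natCast]
    rw [show ((k : Nat) : Int) + 1 = (((k + 1 : Nat)) : Int) by push_cast; ring]
    rw [PySem.List.slice_from_natCast]
    simpa using he

theorem trans_any_iff (d b : List Char) :
    ((PySem.List.pyRange 0 ((d.length : Int) - 1) 1).any (fun i =>
        (PySem.List.pySetD (PySem.List.pySetD d i (PySem.List.pyGetD d (i + 1) ' ')) (i + 1)
          (PySem.List.pyGetD d i ' ')) == b)) = true
      ↔ (∃ k : Nat, k + 1 < d.length ∧ pvSwap d k = b) := by
  rw [List.any_eq_true]
  constructor
  · rintro ⟨i, hmem, hp⟩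
    rw [PySem.List.mem_pyRange_one] at hmem
    obtain ⟨h0, hn⟩ := hmem
    refine ⟨i.toNat, by omega, ?_⟩
    have hi : i = ((i.toNat : Nat) : Int) := by omega
    rw [hi, show ((i.toNat : Nat) : Int) + 1 = (((i.toNat + 1 : Nat)) : Int) by push_cast; ring] at hp
    simp only [PySem.List.pySetD_natCast, PySem.List.pyGetD_natCast] at hp
    simpa [pvSwap] using hp
  · rintro ⟨k, hk, he⟩
    refine ⟨(k : Int), PySem.List.mem_pyRange_one.mpr ⟨by omega, by omega⟩, ?_⟩
    rw [show ((k : Nat) : Int) + 1 = (((k + 1 : Nat)) : Int) by push_cast; ring]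
    simp only [PySem.List.pySetD_natCast, PySem.List.pyGetD_natCast]
    simpa [pvSwap] using he

theorem diffsum_eq (d b : List Char) :
    (d.zip b).foldl (fun acc p => if p.1 ≠ p.2 then acc + 1 else acc) (0 : Int)
      = ((d.zip b).countP (fun p => decide ¬ p.1 = p.2) : Int) := by
  rw [PySem.List.foldl_ite_add_one]
  simp

theorem ite_bool (c : Bool) : (if c = true then true else false) = c := by
  cases c <;> simp

theorem zip_self_all (f : Char → Char) (d : List Char) :
    (d.zip d).all (fun p => f p.1 == p.2) = d.all (fun c => f c == c) := by
  induction d with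
  | nil => rfl
  | cons x xs ih => simp [List.zip_cons_cons, ih]

theorem trB_ne_iff (c : Char) : pvTrB c ≠ c ↔ (c == '0' || c == '1' || c == '5') = true := by
  unfold pvTrB
  by_cases h0 : c = '0'
  · subst h0; decide
  · by_cases h1 : c = '1'
    · subst h1; decide
    · by_cases h5 : c = '5'
      · subst h5; decide
      · simp [h0, h1, h5]

-- pattern-1 failing on an identical string forces a 0/1/5 character in it
theorem digit_of_all_false (d : List Char)
    (h : (d.zip d).all (fun p => pvTrB p.1 == p.2) = false) :
    d.any (fun c => c == '0' || c == '1' || c == '5') = true := by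
  rw [zip_self_all] at h
  rw [List.any_eq_true]
  have := List.all_eq_false.mp h
  obtain ⟨c, hc, hne⟩ := this
  exact ⟨c, hc, (trB_ne_iff c).mp (by simpa using hne)⟩

theorem main_eq (domain brand : String)
    (hD : ¬ D_is_typosquat_strict_py domain brand) :
    is_typosquat_strict_py domain brand = is_typosquat_strict_py_alt domain brand := by
  simp only [is_typosquat_strict_py, is_typosquat_strict_py_alt]
  have hDl : ¬ (domain.toList = brand.toList
      ∧ domain.toList.any (fun c => c == '0' || c == '1' || c == '5') = true
      ∧ (domain.toList.zip domain.toList.tail).any (fun p => p.1 == p.2) = true) := by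
    intro ⟨h1, h2, h3⟩
    exact hD ⟨by apply String.ext; exact h1, h2, h3⟩
  revert hDl
  generalize domain.toList = d
  generalize brand.toList = b
  intro hDl
  by_cases hg : ((d.length : Int) - (b.length : Int)).natAbs > 3
  · simp [hg]
  · simp only [if_neg hg]
    have hs1 : (PySem.Chars.replace (PySem.Chars.replace (PySem.Chars.replace d ['0'] ['o']) ['1'] ['l']) ['5'] ['s'] == b)
        = ((d.length == b.length) && (d.zip b).all (fun p => pvTrB p.1 == p.2)) := by
      rw [replace_chain_eq_map]
      apply bool_eq_of_iff
      simp only [beq_iff_eq, Bool.and_eq_true, Nat.beq_eq_true_eq]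
      rw [map_eq_iff]
    rw [hs1]
    by_cases hc1 : ((d.length == b.length) && (d.zip b).all (fun p => pvTrB p.1 == p.2)) = true
    · simp [hc1]
    · simp only [Bool.not_eq_true] at hc1
      rw [hc1]
      simp only [Bool.false_eq_true, if_false]
      by_cases hnm1 : d.length = b.length + 1
      · have hnm : ¬ d.length = b.length := by omega
        have e1 : (d.length == b.length + 1) = true := by simp [hnm1]
        have e2 : (d.length == b.length) = false := by simp [hnm]
        rw [e1, e2]
        simp only [Bool.true_and, Bool.false_and, Bool.false_eq_true, if_false, if_true]
        rw [ite_bool]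
        apply bool_eq_of_iff
        rw [del_any_iff, del_iff d b hnm1, beq_iff_eq]
      · by_cases hnm : d.length = b.length
        · have e1 : (d.length == b.length + 1) = false := by simp [hnm1]
          have e2 : (d.length == b.length) = true := by simp [hnm]
          rw [e1, e2]
          simp only [Bool.true_and, Bool.false_and, Bool.false_eq_true, if_false, if_true]
          by_cases hj : pvPfx d b = d.length
          · have hdb : d = b := (pfx_eq_length_iff d b hnm).mp hj
            have hc0 : (d.zip b).countP (fun p => decide ¬ p.1 = p.2) = 0 :=
              (countP_zero_iff d b hnm).mpr hdb
            have hdz : (pvDiffSum d b == 1) = false := by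
              unfold pvDiffSum
              rw [diffsum_eq, hc0]
              simp
            have ej : (pvPfx d b == d.length) = true := by simp [hj]
            rw [hdz, ej]
            simp only [Bool.false_eq_true, if_false, if_true]
            rw [ite_bool]
            -- here d = b and pattern 1 failed, so d contains a 0/1/5 digit;
            -- ¬D_ then rules out an equal adjacent pair, so A's transposition scan is false too
            subst hdb
            have hdig : d.any (fun c => c == '0' || c == '1' || c == '5') = true :=
              digit_of_all_false d (by simpa [hnm] using hc1)
            have hadj : (d.zip d.tail).any (fun p => p.1 == p.2) = false := by
              by_contra hcon
              simp only [Bool.not_eq_false] at hcon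
              exact hDl ⟨rfl, hdig, hcon⟩
            apply bool_eq_of_iff
            rw [trans_any_iff, trans_iff d d rfl, if_pos hj, hadj]
          · have ej : (pvPfx d b == d.length) = false := by simp [hj]
            rw [ej]
            simp only [Bool.false_eq_true, if_false]
            by_cases hsub : d.drop (pvPfx d b + 1) = b.drop (pvPfx d b + 1)
            · have hd1 : (pvDiffSum d b == 1) = true := by
                unfold pvDiffSum
                rw [diffsum_eq, (diff_one_iff d b hnm).mpr ⟨hj, hsub⟩]
                simp
              have hsb : (d.drop (pvPfx d b + 1) == b.drop (pvPfx d b + 1)) = true := by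
                simp [hsub]
              rw [hd1, hsb]
              simp
            · have hd1 : (pvDiffSum d b == 1) = false := by
                unfold pvDiffSum
                rw [diffsum_eq]
                have : (d.zip b).countP (fun p => decide ¬ p.1 = p.2) ≠ 1 := by
                  intro hc
                  exact hsub ((diff_one_iff d b hnm).mp hc).2
                simp only [beq_eq_false_iff_ne]
                exact_mod_cast fun hx => this (by exact_mod_cast hx)
              have hsb : (d.drop (pvPfx d b + 1) == b.drop (pvPfx d b + 1)) = false := by
                simp [hsub]
              rw [hd1, hsb]
              simp only [Bool.false_eq_true, if_false]
              rw [ite_bool]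
              apply bool_eq_of_iff
              rw [trans_any_iff]
              rw [trans_iff d b hnm, if_neg hj]
              simp only [Bool.and_eq_true, decide_eq_true_eq, beq_iff_eq, and_assoc]
        · have e1 : (d.length == b.length + 1) = false := by simp [hnm1]
          have e2 : (d.length == b.length) = false := by simp [hnm]
          rw [e1, e2]
          simp

-- inside D_ the two ports always disagree: A = true, B = false
theorem tight_lemma (domain brand : String)
    (hD : D_is_typosquat_strict_py domain brand) :
    is_typosquat_strict_py domain brand = true ∧ is_typosquat_strict_py_alt domain brand = false := by
  obtain ⟨hEq, hdig, hadj⟩ := hD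
  subst hEq
  simp only [is_typosquat_strict_py, is_typosquat_strict_py_alt]
  set d := domain.toList with hd
  have hg : ¬ ((d.length : Int) - (d.length : Int)).natAbs > 3 := by simp
  have hallf : (d.zip d).all (fun p => pvTrB p.1 == p.2) = false := by
    rw [zip_self_all]
    rw [List.any_eq_true] at hdig
    obtain ⟨c, hc, hcd⟩ := hdig
    exact List.all_eq_false.mpr ⟨c, hc, by simpa using (trB_ne_iff c).mpr hcd⟩
  have hmap : (d.map pvTrB == d) = false := by
    apply beq_eq_false_iff_ne.mpr
    intro hme
    have : (d.zip d).all (fun p => pvTrB p.1 == p.2) = true :=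
      ((map_eq_iff pvTrB d d).mp hme).2
    rw [hallf] at this; exact absurd this (by simp)
  have hpfx : pvPfx d d = d.length := (pfx_eq_length_iff d d rfl).mpr rfl
  constructor
  · -- A = true via the transposition scan
    rw [if_neg hg]
    rw [show (PySem.Chars.replace (PySem.Chars.replace (PySem.Chars.replace d ['0'] ['o']) ['1'] ['l']) ['5'] ['s'] == d) = false by
      rw [replace_chain_eq_map]; exact hmap]
    have hdz : (pvDiffSum d d == 1) = false := by
      unfold pvDiffSum
      rw [diffsum_eq, (countP_zero_iff d d rfl).mpr rfl]
      simp
    have htr : ((PySem.List.pyRange 0 ((d.length : Int) - 1) 1).any (fun i =>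
        (PySem.List.pySetD (PySem.List.pySetD d i (PySem.List.pyGetD d (i + 1) ' ')) (i + 1)
          (PySem.List.pyGetD d i ' ')) == d)) = true := by
      rw [trans_any_iff, trans_iff d d rfl, if_pos hpfx]
      exact hadj
    simp [hdz, htr]
  · -- B = false: pattern 1 fails and the first-mismatch scan reaches the end
    rw [if_neg hg]
    simp [hallf, hpfx]

-- ===== VERDICT (by name: the statements are the Claim_ definitions above) =====
theorem is_typosquat_strict_py_spec : Claim_unchanged_is_typosquat_strict_py := by
  intro domain brand _
  unfold Spec_is_typosquat_strict_py
  intro hD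
  exact main_eq domain brand hD

theorem is_typosquat_strict_py_changed : Claim_changed_is_typosquat_strict_py := by
  unfold Claim_changed_is_typosquat_strict_py; decide

theorem is_typosquat_strict_py_tight : Claim_exact_is_typosquat_strict_py := by
  intro domain brand _ hD
  obtain ⟨ha, hb⟩ := tight_lemma domain brand hD
  rw [ha, hb]
  simp
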